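-- pv_equiv track=rewrite | github.com/metawake/chunkweaver | examples/ml-detectors/clinical_section_detector/benchmark.py | _make_clean_note
-- ===== SOURCE A (Python) =====
-- def _make_clean_note(note: list[tuple[str, str]]) -> tuple[str, list[int]]:
--     """Build a clean note with blank-line separators. Return (text, boundary_lines)."""
--     parts = [text for _, text in note]
--     full = "\n\n".join(parts)
--     lines = full.split("\n")
--
--     boundary_lines: list[int] = []
--     offset = 0
--     for i, (_, text) in enumerate(note):
--         if i > 0:
--             boundary_line = offset
--             for j in range(offset, len(lines)):
--                 if lines[j].strip():
--                     boundary_lines.append(j)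
--                     break
--         section_lines = text.split("\n")
--         offset += len(section_lines) + 1
--
--     return full, boundary_lines
-- ===== SOURCE B (Python) =====
-- def _make_clean_note(note: list[tuple[str, str]]) -> tuple[str, list[int]]:
--     """Build a clean note with blank-line separators. Return (text, boundary_lines)."""
--     parts = [text for _, text in note]
--     full = "\n\n".join(parts)
--     lines = full.split("\n")
--
--     # One backward pass: nxt[j] = index of first non-blank line at or after j.
--     nxt: list = [None] * (len(lines) + 1)
--     for j in range(len(lines) - 1, -1, -1):
--         nxt[j] = j if lines[j].strip() else nxt[j + 1]
--
--     boundary_lines: list[int] = []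
--     offset = 0
--     for text in parts[:-1]:
--         offset += len(text.split("\n")) + 1
--         b = nxt[offset]
--         if b is not None:
--             boundary_lines.append(b)
--     return full, boundary_lines
-- ===== Notes on version B (the rewrite author's own statement) =====
-- stated objective: faster
-- what changed: B replaces A's per-section forward rescan for the next non-blank line by a single backward pass that precomputes, for every line index, the next non-blank line, so each boundary is an O(1) lookup.
import Mathlib
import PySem

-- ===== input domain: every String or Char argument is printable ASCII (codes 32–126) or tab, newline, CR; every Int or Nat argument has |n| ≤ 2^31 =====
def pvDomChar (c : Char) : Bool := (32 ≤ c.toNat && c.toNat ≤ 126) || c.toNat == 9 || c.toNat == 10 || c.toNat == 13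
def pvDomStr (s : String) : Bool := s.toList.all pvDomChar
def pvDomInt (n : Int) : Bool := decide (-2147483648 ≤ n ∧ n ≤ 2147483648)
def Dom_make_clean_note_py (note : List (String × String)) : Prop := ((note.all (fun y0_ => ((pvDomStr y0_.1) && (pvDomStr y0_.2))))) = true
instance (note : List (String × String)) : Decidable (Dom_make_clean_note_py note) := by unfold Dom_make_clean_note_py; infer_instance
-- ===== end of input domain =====

-- B replaces A's per-section forward rescan for the next non-blank line by one backward
-- precomputation pass over the lines with O(1) lookups per section boundary.

-- ===== PORT A =====
-- inner loop 'for j in range(offset, len(lines)): if lines[j].strip(): append j; break'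
def pvScanA (lines : List (List Char)) (j : Nat) : Option Nat :=
  if h : j < lines.length then
    if PySem.Chars.strip lines[j] ≠ [] then some j else pvScanA lines (j + 1)
  else none
termination_by lines.length - j

def make_clean_note_py (note : List (String × String)) : String × List Int :=
  let parts := note.map (fun p => p.2)
  let full := PySem.Str.join "\n\n" parts
  let lines := PySem.Chars.splitOn full.toList ['\n']
  let st := (PySem.List.enumerate note).foldl
    (fun (st : List Int × Nat) it =>
      let bls :=
        if it.1 > 0 then
          match pvScanA lines st.2 with
          | some j => st.1 ++ [(j : Int)]
          | none => st.1
        else st.1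
      let section_lines := PySem.Chars.splitOn it.2.2.toList ['\n']
      (bls, st.2 + (section_lines.length + 1)))
    ([], 0)
  (full, st.1)

-- ===== PORT B =====
-- the Python backward fill 'for j in range(len(lines)-1, -1, -1): nxt[j] = j if lines[j].strip() else nxt[j+1]'
-- ported as the structural right-to-left recursion producing the suffix nxt[j..len]
def pvNxtB (lines : List (List Char)) (j : Nat) : List (Option Nat) :=
  match lines with
  | [] => [none]
  | l :: rest =>
    let tail := pvNxtB rest (j + 1)
    (if PySem.Chars.strip l ≠ [] then some j else tail.getD 0 none) :: tail

def make_clean_note_py_alt (note : List (String × String)) : String × List Int :=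
  let parts := note.map (fun p => p.2)
  let full := PySem.Str.join "\n\n" parts
  let lines := PySem.Chars.splitOn full.toList ['\n']
  let nxt := pvNxtB lines 0
  let st := parts.dropLast.foldl
    (fun (st : List Int × Nat) text =>
      let offset := st.2 + ((PySem.Chars.splitOn text.toList ['\n']).length + 1)
      -- nxt[offset]: 'offset' never exceeds len(lines) in Python, so getD is exact here
      match nxt.getD offset none with
      | some j => (st.1 ++ [(j : Int)], offset)
      | none => (st.1, offset))
    ([], 0)
  (full, st.1)

-- ===== PRECONDITION & SPEC =====
def Spec_make_clean_note_py (note : List (String × String)) (out : String × List Int) : Prop := out = make_clean_note_py_alt note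
instance (note : List (String × String)) (out : String × List Int) : Decidable (Spec_make_clean_note_py note out) := by unfold Spec_make_clean_note_py; infer_instance

-- ===== CLAIM (what is proved, stated in full; the proofs are below) =====
def Claim_equal_make_clean_note_py : Prop := ∀ (note : List (String × String)), Dom_make_clean_note_py note → Spec_make_clean_note_py note (make_clean_note_py note)

-- ===== LEMMAS AND PROOFS =====

-- index of the first non-blank line of a suffix: the common characterisation of both ports' lookups
def pvFirst (ls : List (List Char)) : Option Nat :=
  ls.findIdx? (fun l => decide (PySem.Chars.strip l ≠ []))

theorem pvScanA_eq (lines : List (List Char)) (j : Nat) :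
    pvScanA lines j = (pvFirst (lines.drop j)).map (· + j) := by
  rw [pvScanA]
  by_cases h : j < lines.length
  · simp only [h, dite_true]
    rw [List.drop_eq_getElem_cons h]
    unfold pvFirst
    rw [List.findIdx?_cons]
    by_cases hp : PySem.Chars.strip lines[j] ≠ []
    · simp [hp]
    · simp only [hp, decide_eq_true_eq, if_false]
      rw [pvScanA_eq lines (j+1)]
      unfold pvFirst
      cases (lines.drop (j+1)).findIdx? (fun l => decide (PySem.Chars.strip l ≠ [])) with
      | none => simp
      | some k => simp; omega
  · simp only [h, dite_false]
    rw [List.drop_eq_nil_of_le (by omega)]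
    simp [pvFirst]
termination_by lines.length - j

theorem pvNxtB_getD (lines : List (List Char)) (j k : Nat) :
    (pvNxtB lines j).getD k none = (pvFirst (lines.drop k)).map (· + (j + k)) := by
  induction lines generalizing j k with
  | nil => cases k <;> simp [pvNxtB, pvFirst]
  | cons l rest ih =>
    cases k with
    | zero =>
      simp only [pvNxtB, List.getD_cons_zero, List.drop_zero]
      by_cases hp : PySem.Chars.strip l ≠ []
      · simp [pvFirst, List.findIdx?_cons, hp]
      · rw [if_neg hp]
        rw [ih (j+1) 0]
        unfold pvFirst
        rw [List.findIdx?_cons]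
        simp only [List.drop_zero]
        cases rest.findIdx? (fun l => decide (PySem.Chars.strip l ≠ [])) with
        | none => simp [hp]
        | some m => simp [hp]; omega
    | succ k' =>
      simp only [pvNxtB, List.getD_cons_succ, List.drop_succ_cons]
      rw [ih (j+1) k']
      unfold pvFirst
      cases h : (rest.drop k').findIdx? (fun l => !decide (PySem.Chars.strip l = [])) with
      | none => simp [h]
      | some m => simp [h]; omega

theorem pvNxtB_getD_zero (lines : List (List Char)) (k : Nat) :
    (pvNxtB lines 0).getD k none = pvScanA lines k := by
  rw [pvNxtB_getD, pvScanA_eq]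
  simp

-- the sequence of appended boundaries, abstracted over the lookup g and the section line-counts
def pvOutA (g : Nat → Option Nat) : List Nat → Nat → List Int
  | [], _ => []
  | L :: Ls, off =>
    (match g off with | some j => [(j : Int)] | none => []) ++ pvOutA g Ls (off + L)

def pvOutB (g : Nat → Option Nat) : List Nat → Nat → List Int
  | [], _ => []
  | L :: Ls, off =>
    (match g (off + L) with | some j => [(j : Int)] | none => []) ++ pvOutB g Ls (off + L)

-- A appends the lookup at the CURRENT offset and then advances by the section's line count;
-- B advances by the previous section's line count and then appends: over a one-shifted list they agree
theorem pvOutA_eq_pvOutB (g : Nat → Option Nat) (Ls : List Nat) (L0 off : Nat) (h : Ls ≠ []) :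
    pvOutA g Ls (off + L0) = pvOutB g (L0 :: Ls.dropLast) off := by
  induction Ls generalizing L0 off with
  | nil => exact absurd rfl h
  | cons L Ls' ih =>
    cases Ls' with
    | nil => simp [pvOutA, pvOutB]
    | cons M Ms =>
      rw [List.dropLast_cons₂]
      rw [pvOutB, pvOutA]
      rw [ih L (off + L0) (by simp)]

def pvLen (text : String) : Nat := (PySem.Chars.splitOn text.toList ['\n']).length + 1

theorem foldA (lines : List (List Char)) (rest : List (String × String)) (s : Int) (hs : 1 ≤ s)
    (bls : List Int) (off : Nat) :
    ((PySem.List.enumerate rest s).foldl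
      (fun (st : List Int × Nat) (it : Int × (String × String)) =>
        ((if it.1 > 0 then
            match pvScanA lines st.2 with
            | some j => st.1 ++ [(j : Int)]
            | none => st.1
          else st.1),
         st.2 + ((PySem.Chars.splitOn it.2.2.toList ['\n']).length + 1)))
      (bls, off)) =
    (bls ++ pvOutA (pvScanA lines) (rest.map (fun p => pvLen p.2)) off,
     off + (rest.map (fun p => pvLen p.2)).sum) := by
  induction rest generalizing s bls off with
  | nil => simp [PySem.List.enumerate_nil, pvOutA]
  | cons x r ih =>
    rw [PySem.List.enumerate_cons, List.foldl_cons]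
    simp only
    rw [if_pos (by omega)]
    rw [ih (s+1) (by omega)]
    simp only [List.map_cons]
    rw [pvOutA]
    simp only [Prod.mk.injEq]
    constructor
    · cases pvScanA lines off <;> simp [pvLen]
    · simp [pvLen]; omega

theorem foldB (nxt : List (Option Nat)) (ys : List String) (bls : List Int) (off : Nat) :
    (ys.foldl
      (fun (st : List Int × Nat) text =>
        match nxt.getD (st.2 + ((PySem.Chars.splitOn text.toList ['\n']).length + 1)) none with
        | some j => (st.1 ++ [(j : Int)], st.2 + ((PySem.Chars.splitOn text.toList ['\n']).length + 1))
        | none => (st.1, st.2 + ((PySem.Chars.splitOn text.toList ['\n']).length + 1)))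
      (bls, off)) =
    (bls ++ pvOutB (fun k => nxt.getD k none) (ys.map pvLen) off,
     off + (ys.map pvLen).sum) := by
  induction ys generalizing bls off with
  | nil => simp [pvOutB]
  | cons y r ih =>
    rw [List.foldl_cons]
    simp only [List.map_cons]
    rw [pvOutB]
    cases h : nxt.getD (off + ((PySem.Chars.splitOn y.toList ['\n']).length + 1)) none with
    | some j =>
      simp only [ih]
      simp only [Prod.mk.injEq]
      refine ⟨?_, by simp [pvLen]; omega⟩
      simp only [List.getD] at h
      simp [pvLen, List.getD, h]
    | none =>
      simp only [ih]
      simp only [Prod.mk.injEq]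
      refine ⟨?_, by simp [pvLen]; omega⟩
      simp only [List.getD] at h
      simp [pvLen, List.getD, h]

-- ===== VERDICT (by name: the statement is the Claim_ definition above) =====
theorem make_clean_note_py_spec : Claim_equal_make_clean_note_py := by
  intro note _
  unfold Spec_make_clean_note_py make_clean_note_py make_clean_note_py_alt
  cases note with
  | nil => rfl
  | cons t0 rest =>
    simp only [List.map_cons]
    rw [PySem.List.enumerate_cons, List.foldl_cons]
    simp only
    rw [if_neg (by omega)]
    simp only [zero_add]
    rw [foldA _ rest 1 (by omega)]
    cases rest with
    | nil =>
      simp [pvOutA]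
    | cons x r =>
      rw [List.map_cons, List.dropLast_cons₂]
      rw [foldB]
      rw [funext (pvNxtB_getD_zero (PySem.Chars.splitOn (PySem.Str.join "\n\n" (t0.2 :: x.2 :: r.map (fun p => p.2))).toList ['\n']))]
      simp only [List.map_cons, Prod.mk.injEq, true_and]
      rw [List.map_dropLast, ← List.map_cons]
      have := pvOutA_eq_pvOutB
        (pvScanA (PySem.Chars.splitOn (PySem.Str.join "\n\n" (t0.2 :: x.2 :: r.map (fun p => p.2))).toList ['\n']))
        ((x :: r).map (fun p => pvLen p.2)) (pvLen t0.2) 0 (by simp)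
      rw [Nat.zero_add] at this
      rw [List.map_cons] at this
      simp only [List.map_cons, List.map_map, Function.comp_def, pvLen, List.nil_append] at this ⊢
      exact this
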